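-- pv_equiv track=rewrite | github.com/inforelatoriosagro/ppe_consultoria | codigos/ppe_engine.py | generate_explicit_tickers
-- ===== SOURCE A (Python) =====
-- LISTED_MONTHS = {
--     "ZC": [3, 5, 7, 9, 12],
--     "ZS": [1, 3, 5, 7, 8, 9, 11],
-- }
--
-- MONTH_NUM_TO_CODE = {
--     1: "F", 2: "G", 3: "H", 4: "J", 5: "K", 6: "M",
--     7: "N", 8: "Q", 9: "U", 10: "V", 11: "X", 12: "Z",
-- }
--
-- def choose_start_month(symbol: str, from_year: int, from_month: int):
--     listed = LISTED_MONTHS[symbol]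
--     candidates = [(from_year, m) for m in listed if m >= from_month]
--     base = candidates[0] if candidates else (from_year + 1, listed[0])
--     return base
--
-- def generate_explicit_tickers(symbol: str, start_year: int, start_month: int, n: int):
--     listed = LISTED_MONTHS[symbol]
--     y0, m0 = choose_start_month(symbol, start_year, start_month)
--
--     if m0 in listed:
--         idx = listed.index(m0)
--     else:
--         idx = 0
--         for j, lm in enumerate(listed):
--             if lm >= m0:
--                 idx = j
--                 break
--
--     out = []
--     y, pos = y0, idx
--     for _ in range(n):
--         m = listed[pos]
--         code = MONTH_NUM_TO_CODE[m]
--         out.append(f"{symbol}{code}{y}")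
--         pos += 1
--         if pos >= len(listed):
--             pos = 0
--             y += 1
--     return out
-- ===== SOURCE B (Python) =====
-- LISTED_MONTHS = {
--     "ZC": [3, 5, 7, 9, 12],
--     "ZS": [1, 3, 5, 7, 8, 9, 11],
-- }
--
-- MONTH_NUM_TO_CODE = {
--     1: "F", 2: "G", 3: "H", 4: "J", 5: "K", 6: "M",
--     7: "N", 8: "Q", 9: "U", 10: "V", 11: "X", 12: "Z",
-- }
--
-- def generate_explicit_tickers(symbol: str, start_year: int, start_month: int, n: int):
--     listed = LISTED_MONTHS[symbol]
--     k = max(n, 0)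
--     span = k // len(listed) + 2  # enough whole calendar years to cover k contracts
--     calendar = [(y, m) for y in range(start_year, start_year + span) for m in listed]
--     valid = [(y, m) for (y, m) in calendar if y > start_year or m >= start_month]
--     return [f"{symbol}{MONTH_NUM_TO_CODE[m]}{y}" for (y, m) in valid[:k]]
-- ===== Notes on version B (the rewrite author's own statement) =====
-- stated objective: alternative
-- what changed: Replaces A's stateful ticker loop (mutable position/year with conditional wrap, plus choose_start_month and a redundant index search) by a staged pipeline: materialize whole calendar years of (year, month) pairs, filter out pairs before the start date, slice the first k, then format them.
import Mathlib
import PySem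

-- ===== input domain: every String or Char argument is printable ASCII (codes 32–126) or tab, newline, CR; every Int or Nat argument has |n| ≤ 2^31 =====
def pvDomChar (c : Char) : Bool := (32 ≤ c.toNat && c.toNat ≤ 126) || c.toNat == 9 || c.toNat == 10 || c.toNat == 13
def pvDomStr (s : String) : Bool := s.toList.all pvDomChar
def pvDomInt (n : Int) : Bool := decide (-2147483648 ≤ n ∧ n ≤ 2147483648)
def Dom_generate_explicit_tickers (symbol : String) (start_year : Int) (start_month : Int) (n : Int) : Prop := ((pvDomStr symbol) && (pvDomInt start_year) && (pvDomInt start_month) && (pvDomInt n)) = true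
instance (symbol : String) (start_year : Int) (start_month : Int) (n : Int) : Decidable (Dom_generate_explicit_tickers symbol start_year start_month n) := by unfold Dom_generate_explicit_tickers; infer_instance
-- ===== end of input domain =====

-- B replaces A's stateful position/year stepping by a staged pipeline: build whole
-- calendar years of (year, month) pairs, filter out the pairs before the start, slice
-- off the first k, then format them (objective: alternative decomposition).

-- shared module constants (both Pythons use the same module-level dicts)
def pvListedMonths : PySem.Dict String (List Int) :=
  PySem.Dict.ofList [("ZC", [3, 5, 7, 9, 12]), ("ZS", [1, 3, 5, 7, 8, 9, 11])]

def pvMonthCode : PySem.Dict Int String :=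
  PySem.Dict.ofList [(1, "F"), (2, "G"), (3, "H"), (4, "J"), (5, "K"), (6, "M"),
                     (7, "N"), (8, "Q"), (9, "U"), (10, "V"), (11, "X"), (12, "Z")]

-- ===== PORT A =====
def choose_start_month (symbol : String) (from_year : Int) (from_month : Int) : Int × Int :=
  let listed := (PySem.Dict.get? pvListedMonths symbol).getD []
  let candidates := (listed.filter (fun m => from_month ≤ m)).map (fun m => (from_year, m))
  match candidates with
  | c :: _ => c
  | [] => (from_year + 1, (PySem.List.pyGet? listed 0).getD 0)

-- A's fallback loop: 'idx = 0; for j, lm in enumerate(listed): if lm >= m0: idx = j; break'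
def pvFallbackIdx : List Int → Int → Nat → Nat
  | [], _, _ => 0
  | lm :: rest, m0, j => if m0 ≤ lm then j else pvFallbackIdx rest m0 (j + 1)

-- A's main loop: 'for _ in range(n)' with mutable out, y, pos
def pvALoop (symbol : String) (listed : List Int) : Nat → List String → Int → Nat → List String
  | 0, out, _, _ => out
  | k + 1, out, y, pos =>
    let m := (PySem.List.pyGet? listed (pos : Int)).getD 0
    let code := (PySem.Dict.get? pvMonthCode m).getD ""
    let out := out ++ [symbol ++ code ++ PySem.Int.toStr y]
    let pos' := pos + 1
    if listed.length ≤ pos' then pvALoop symbol listed k out (y + 1) 0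
    else pvALoop symbol listed k out y pos'

def generate_explicit_tickers (symbol : String) (start_year : Int) (start_month : Int) (n : Int) : List String :=
  let listed := (PySem.Dict.get? pvListedMonths symbol).getD []
  let ym := choose_start_month symbol start_year start_month
  let y0 := ym.1
  let m0 := ym.2
  let idx : Nat :=
    if listed.contains m0 then (PySem.List.index? listed m0).getD 0
    else pvFallbackIdx listed m0 0
  pvALoop symbol listed n.toNat [] y0 idx

-- ===== PORT B =====
def generate_explicit_tickers_alt (symbol : String) (start_year : Int) (start_month : Int) (n : Int) : List String :=
  let listed := (PySem.Dict.get? pvListedMonths symbol).getD []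
  let k : Int := max n 0
  let span : Int := PySem.Int.floordiv k listed.length + 2
  let calendar := (PySem.List.pyRange start_year (start_year + span) 1).flatMap
    (fun y => listed.map (fun m => (y, m)))
  let valid := calendar.filter (fun t => decide (start_year < t.1) || decide (start_month ≤ t.2))
  (PySem.List.slice valid none (some k)).map
    (fun t => symbol ++ (PySem.Dict.get? pvMonthCode t.2).getD "" ++ PySem.Int.toStr t.1)

-- ===== PRECONDITION & SPEC =====
-- Pre_ excludes exactly the symbols not listed in LISTED_MONTHS, on which A raises KeyError.
def Pre_generate_explicit_tickers (symbol : String) (start_year : Int) (start_month : Int) (n : Int) : Prop :=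
  symbol = "ZC" ∨ symbol = "ZS"
instance (symbol : String) (start_year : Int) (start_month : Int) (n : Int) : Decidable (Pre_generate_explicit_tickers symbol start_year start_month n) := by unfold Pre_generate_explicit_tickers; infer_instance

def pvWitness_generate_explicit_tickers : String × Int × Int × Int := ("ZC", 2024, 12, 6)

def Spec_generate_explicit_tickers (symbol : String) (start_year : Int) (start_month : Int) (n : Int) (out : List String) : Prop := out = generate_explicit_tickers_alt symbol start_year start_month n
instance (symbol : String) (start_year : Int) (start_month : Int) (n : Int) (out : List String) : Decidable (Spec_generate_explicit_tickers symbol start_year start_month n out) := by unfold Spec_generate_explicit_tickers; infer_instance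

-- ===== CLAIM (what is proved, stated in full; the proofs are below) =====
def Claim_equal_generate_explicit_tickers : Prop := ∀ (symbol : String) (start_year : Int) (start_month : Int) (n : Int), Dom_generate_explicit_tickers symbol start_year start_month n → Pre_generate_explicit_tickers symbol start_year start_month n → Spec_generate_explicit_tickers symbol start_year start_month n (generate_explicit_tickers symbol start_year start_month n)

-- ===== LEMMAS AND PROOFS =====

-- how one (year, month) pair is formatted
def pvFmt (symbol : String) (t : Int × Int) : String :=
  symbol ++ (PySem.Dict.get? pvMonthCode t.2).getD "" ++ PySem.Int.toStr t.1

-- the (year, month) stream both sides walk: the tail of year y from position pos,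
-- followed by s-many further whole years
def pvStream (listed : List Int) : Nat → Int → Nat → List (Int × Int)
  | 0, _, _ => []
  | s + 1, y, pos => ((listed.drop pos).map (fun m => (y, m))) ++ pvStream listed s (y + 1) 0

-- A's loop emits the formatted prefix of the stream
theorem pvALoop_eq (symbol : String) (listed : List Int) :
    ∀ (k : Nat) (acc : List String) (y : Int) (pos s : Nat),
    pos < listed.length → k ≤ listed.length - pos + s * listed.length →
    pvALoop symbol listed k acc y pos =
      acc ++ ((pvStream listed (s + 1) y pos).take k).map (pvFmt symbol) := by
  intro k
  induction k with
  | zero => intro acc y pos s h _; simp [pvALoop]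
  | succ k ih =>
    intro acc y pos s hpos hk
    have hdrop : listed.drop pos = listed[pos] :: listed.drop (pos + 1) :=
      List.drop_eq_getElem_cons hpos
    have hget : (PySem.List.pyGet? listed (pos : Int)).getD 0 = listed[pos] := by
      rw [PySem.List.pyGet?_natCast]; simp [List.getElem?_eq_getElem hpos]
    rw [pvALoop]
    simp only [hget]
    by_cases hwrap : listed.length ≤ pos + 1
    · have hlen : pos + 1 = listed.length := Nat.le_antisymm hpos hwrap
      rw [if_pos hwrap]
      have hdrop1 : listed.drop (pos + 1) = [] := by rw [hlen]; simp
      cases s with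
      | zero =>
        have hk0 : k = 0 := by omega
        subst hk0
        conv_rhs => rw [pvStream, hdrop, hdrop1]
        rw [pvALoop]
        rfl
      | succ s' =>
        rw [ih _ _ 0 s' (by omega) (by rw [Nat.succ_mul] at hk; omega)]
        conv_rhs => rw [pvStream, hdrop, hdrop1]
        conv_rhs => rw [List.map_cons, List.map_nil, List.cons_append, List.take_succ_cons,
          List.map_cons]
        rw [List.append_assoc]
        rfl
    · rw [if_neg hwrap, ih _ _ (pos + 1) s (by omega) (by omega)]
      conv_rhs => rw [pvStream, hdrop]
      conv_rhs => rw [List.map_cons, List.cons_append, List.take_succ_cons, List.map_cons]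
      rw [List.append_assoc]
      conv_lhs => rw [pvStream]
      rfl

-- years strictly after the start year survive the filter whole
theorem pvFull_eq (listed : List Int) (sy sm : Int) :
    ∀ (span : Nat) (y : Int), sy < y →
    ((PySem.List.pyRange y (y + span) 1).flatMap (fun y => listed.map (fun m => (y, m)))).filter
        (fun t => decide (sy < t.1) || decide (sm ≤ t.2))
      = pvStream listed span y 0 := by
  intro span
  induction span with
  | zero => intro y _; simp [PySem.List.pyRange_one, pvStream]
  | succ s ih =>
    intro y hy
    rw [PySem.List.pyRange_one_cons (by omega)]
    simp only [List.flatMap_cons, List.filter_append, pvStream, List.drop_zero]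
    congr 1
    · rw [List.filter_map, List.filter_eq_self.mpr (fun a _ => by simp [hy])]
    · rw [show y + (((s + 1 : Nat)) : Int) = (y + 1) + (s : Int) by push_cast; ring,
          ih (y + 1) (by omega)]

-- the filtered calendar is the stream from (sy, idx), given the first year filters to drop idx
theorem pvValid_eq (listed : List Int) (sy sm : Int) (s idx : Nat)
    (hfirst : (listed.map (fun m => (sy, m))).filter
        (fun t => decide (sy < t.1) || decide (sm ≤ t.2))
      = (listed.drop idx).map (fun m => (sy, m))) :
    ((PySem.List.pyRange sy (sy + ((s : Int) + 1)) 1).flatMap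
        (fun y => listed.map (fun m => (y, m)))).filter
        (fun t => decide (sy < t.1) || decide (sm ≤ t.2))
      = pvStream listed (s + 1) sy idx := by
  rw [PySem.List.pyRange_one_cons (by omega)]
  simp only [List.flatMap_cons, List.filter_append, pvStream]
  rw [hfirst, show sy + ((s : Int) + 1) = (sy + 1) + (s : Int) by ring,
    pvFull_eq listed sy sm s (sy + 1) (by omega)]

-- A's loop from (sy, idx) equals B's pipeline, given the first-year filter keeps the tail from idx
theorem pvBoth (symbol : String) (listed : List Int) (sy sm n : Int) (idx : Nat)
    (hd : (PySem.Dict.get? pvListedMonths symbol).getD [] = listed)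
    (hidx : idx < listed.length)
    (hfirst : (listed.map (fun m => (sy, m))).filter
        (fun t => decide (sy < t.1) || decide (sm ≤ t.2))
      = (listed.drop idx).map (fun m => (sy, m))) :
    pvALoop symbol listed n.toNat [] sy idx = generate_explicit_tickers_alt symbol sy sm n := by
  have hL : 0 < listed.length := by omega
  have hk : max n 0 = ((n.toNat : Nat) : Int) := by omega
  simp only [generate_explicit_tickers_alt, hd, hk]
  rw [PySem.Int.floordiv_natCast]
  rw [show ((n.toNat / listed.length : Nat) : Int) + 2
      = ((n.toNat / listed.length + 1 : Nat) : Int) + 1 by push_cast; ring]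
  rw [pvValid_eq listed sy sm (n.toNat / listed.length + 1) idx hfirst]
  rw [PySem.List.slice_to_natCast]
  rw [pvALoop_eq symbol listed n.toNat [] sy idx (n.toNat / listed.length + 1) hidx
    (by have h1 := Nat.div_add_mod n.toNat listed.length
        have h2 : n.toNat % listed.length < listed.length := Nat.mod_lt _ hL
        have h3 : (n.toNat / listed.length + 1) * listed.length
            = listed.length * (n.toNat / listed.length) + listed.length := by ring
        omega)]
  rfl

-- wrap case: the whole first year is filtered away; A starts at (sy + 1, 0)
theorem pvBothWrap (symbol : String) (listed : List Int) (sy sm n : Int)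
    (hd : (PySem.Dict.get? pvListedMonths symbol).getD [] = listed)
    (hL : 0 < listed.length)
    (hfirst : (listed.map (fun m => (sy, m))).filter
        (fun t => decide (sy < t.1) || decide (sm ≤ t.2)) = []) :
    pvALoop symbol listed n.toNat [] (sy + 1) 0 = generate_explicit_tickers_alt symbol sy sm n := by
  have hk : max n 0 = ((n.toNat : Nat) : Int) := by omega
  simp only [generate_explicit_tickers_alt, hd, hk]
  rw [PySem.Int.floordiv_natCast]
  rw [show ((n.toNat / listed.length : Nat) : Int) + 2
      = ((n.toNat / listed.length + 1 : Nat) : Int) + 1 by push_cast; ring]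
  rw [pvValid_eq listed sy sm (n.toNat / listed.length + 1) listed.length
    (by rw [List.drop_length]; simpa using hfirst)]
  rw [show pvStream listed (n.toNat / listed.length + 1 + 1) sy listed.length
      = pvStream listed (n.toNat / listed.length + 1) (sy + 1) 0 by
        rw [pvStream]; simp [List.drop_length]]
  rw [PySem.List.slice_to_natCast]
  rw [pvALoop_eq symbol listed n.toNat [] (sy + 1) 0 (n.toNat / listed.length) hL
    (by have h1 := Nat.div_add_mod n.toNat listed.length
        have h2 : n.toNat % listed.length < listed.length := Nat.mod_lt _ hL
        have h3 : n.toNat / listed.length * listed.length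
            = listed.length * (n.toNat / listed.length) := Nat.mul_comm _ _
        omega)]
  rfl

theorem generate_explicit_tickers_spec : Claim_equal_generate_explicit_tickers := by
  intro symbol sy sm n _ hpre
  unfold Spec_generate_explicit_tickers
  rcases hpre with rfl | rfl
  · have hd : (PySem.Dict.get? pvListedMonths "ZC").getD [] = [3, 5, 7, 9, 12] := by decide
    have hcase : sm ≤ 3 ∨ (3 < sm ∧ sm ≤ 5) ∨ (5 < sm ∧ sm ≤ 7) ∨ (7 < sm ∧ sm ≤ 9) ∨ (9 < sm ∧ sm ≤ 12) ∨ 12 < sm := by omega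
    rcases hcase with h | h | h | h | h | h
    · refine Eq.trans ?_ (pvBoth "ZC" [3, 5, 7, 9, 12] sy sm n 0 hd (by norm_num)
        (by simp [show sm ≤ 3 by omega, show sm ≤ 5 by omega, show sm ≤ 7 by omega, show sm ≤ 9 by omega, show sm ≤ 12 by omega]))
      simp only [generate_explicit_tickers, choose_start_month, hd]
      simp only [List.filter_cons, List.filter_nil, decide_eq_true_eq]
      simp only [if_pos (show sm ≤ 3 by omega), if_pos (show sm ≤ 5 by omega), if_pos (show sm ≤ 7 by omega), if_pos (show sm ≤ 9 by omega), if_pos (show sm ≤ 12 by omega), List.map_cons]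
      rw [show (List.contains [(3:Int), 5, 7, 9, 12] 3) = true from by decide]
      rw [show (PySem.List.index? [(3:Int), 5, 7, 9, 12] 3).getD 0 = 0 from by decide]
      simp
    · refine Eq.trans ?_ (pvBoth "ZC" [3, 5, 7, 9, 12] sy sm n 1 hd (by norm_num)
        (by simp [show ¬ sm ≤ 3 by omega, show sm ≤ 5 by omega, show sm ≤ 7 by omega, show sm ≤ 9 by omega, show sm ≤ 12 by omega]))
      simp only [generate_explicit_tickers, choose_start_month, hd]
      simp only [List.filter_cons, List.filter_nil, decide_eq_true_eq]
      simp only [if_neg (show ¬ sm ≤ 3 by omega), if_pos (show sm ≤ 5 by omega), if_pos (show sm ≤ 7 by omega), if_pos (show sm ≤ 9 by omega), if_pos (show sm ≤ 12 by omega), List.map_cons]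
      rw [show (List.contains [(3:Int), 5, 7, 9, 12] 5) = true from by decide]
      rw [show (PySem.List.index? [(3:Int), 5, 7, 9, 12] 5).getD 0 = 1 from by decide]
      simp
    · refine Eq.trans ?_ (pvBoth "ZC" [3, 5, 7, 9, 12] sy sm n 2 hd (by norm_num)
        (by simp [show ¬ sm ≤ 3 by omega, show ¬ sm ≤ 5 by omega, show sm ≤ 7 by omega, show sm ≤ 9 by omega, show sm ≤ 12 by omega]))
      simp only [generate_explicit_tickers, choose_start_month, hd]
      simp only [List.filter_cons, List.filter_nil, decide_eq_true_eq]
      simp only [if_neg (show ¬ sm ≤ 3 by omega), if_neg (show ¬ sm ≤ 5 by omega), if_pos (show sm ≤ 7 by omega), if_pos (show sm ≤ 9 by omega), if_pos (show sm ≤ 12 by omega), List.map_cons]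
      rw [show (List.contains [(3:Int), 5, 7, 9, 12] 7) = true from by decide]
      rw [show (PySem.List.index? [(3:Int), 5, 7, 9, 12] 7).getD 0 = 2 from by decide]
      simp
    · refine Eq.trans ?_ (pvBoth "ZC" [3, 5, 7, 9, 12] sy sm n 3 hd (by norm_num)
        (by simp [show ¬ sm ≤ 3 by omega, show ¬ sm ≤ 5 by omega, show ¬ sm ≤ 7 by omega, show sm ≤ 9 by omega, show sm ≤ 12 by omega]))
      simp only [generate_explicit_tickers, choose_start_month, hd]
      simp only [List.filter_cons, List.filter_nil, decide_eq_true_eq]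
      simp only [if_neg (show ¬ sm ≤ 3 by omega), if_neg (show ¬ sm ≤ 5 by omega), if_neg (show ¬ sm ≤ 7 by omega), if_pos (show sm ≤ 9 by omega), if_pos (show sm ≤ 12 by omega), List.map_cons]
      rw [show (List.contains [(3:Int), 5, 7, 9, 12] 9) = true from by decide]
      rw [show (PySem.List.index? [(3:Int), 5, 7, 9, 12] 9).getD 0 = 3 from by decide]
      simp
    · refine Eq.trans ?_ (pvBoth "ZC" [3, 5, 7, 9, 12] sy sm n 4 hd (by norm_num)
        (by simp [show ¬ sm ≤ 3 by omega, show ¬ sm ≤ 5 by omega, show ¬ sm ≤ 7 by omega, show ¬ sm ≤ 9 by omega, show sm ≤ 12 by omega]))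
      simp only [generate_explicit_tickers, choose_start_month, hd]
      simp only [List.filter_cons, List.filter_nil, decide_eq_true_eq]
      simp only [if_neg (show ¬ sm ≤ 3 by omega), if_neg (show ¬ sm ≤ 5 by omega), if_neg (show ¬ sm ≤ 7 by omega), if_neg (show ¬ sm ≤ 9 by omega), if_pos (show sm ≤ 12 by omega), List.map_cons]
      rw [show (List.contains [(3:Int), 5, 7, 9, 12] 12) = true from by decide]
      rw [show (PySem.List.index? [(3:Int), 5, 7, 9, 12] 12).getD 0 = 4 from by decide]
      simp
    · refine Eq.trans ?_ (pvBothWrap "ZC" [3, 5, 7, 9, 12] sy sm n hd (by norm_num)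
        (by simp [show ¬ sm ≤ 3 by omega, show ¬ sm ≤ 5 by omega, show ¬ sm ≤ 7 by omega, show ¬ sm ≤ 9 by omega, show ¬ sm ≤ 12 by omega]))
      simp only [generate_explicit_tickers, choose_start_month, hd]
      simp only [List.filter_cons, List.filter_nil, decide_eq_true_eq]
      simp only [if_neg (show ¬ sm ≤ 3 by omega), if_neg (show ¬ sm ≤ 5 by omega), if_neg (show ¬ sm ≤ 7 by omega), if_neg (show ¬ sm ≤ 9 by omega), if_neg (show ¬ sm ≤ 12 by omega), List.map_nil]
      rw [show ((PySem.List.pyGet? [(3:Int), 5, 7, 9, 12] 0).getD 0) = 3 from by decide]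
      rw [show (List.contains [(3:Int), 5, 7, 9, 12] 3) = true from by decide]
      rw [show (PySem.List.index? [(3:Int), 5, 7, 9, 12] 3).getD 0 = 0 from by decide]
      simp
  · have hd : (PySem.Dict.get? pvListedMonths "ZS").getD [] = [1, 3, 5, 7, 8, 9, 11] := by decide
    have hcase : sm ≤ 1 ∨ (1 < sm ∧ sm ≤ 3) ∨ (3 < sm ∧ sm ≤ 5) ∨ (5 < sm ∧ sm ≤ 7) ∨ (7 < sm ∧ sm ≤ 8) ∨ (8 < sm ∧ sm ≤ 9) ∨ (9 < sm ∧ sm ≤ 11) ∨ 11 < sm := by omega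
    rcases hcase with h | h | h | h | h | h | h | h
    · refine Eq.trans ?_ (pvBoth "ZS" [1, 3, 5, 7, 8, 9, 11] sy sm n 0 hd (by norm_num)
        (by simp [show sm ≤ 1 by omega, show sm ≤ 3 by omega, show sm ≤ 5 by omega, show sm ≤ 7 by omega, show sm ≤ 8 by omega, show sm ≤ 9 by omega, show sm ≤ 11 by omega]))
      simp only [generate_explicit_tickers, choose_start_month, hd]
      simp only [List.filter_cons, List.filter_nil, decide_eq_true_eq]
      simp only [if_pos (show sm ≤ 1 by omega), if_pos (show sm ≤ 3 by omega), if_pos (show sm ≤ 5 by omega), if_pos (show sm ≤ 7 by omega), if_pos (show sm ≤ 8 by omega), if_pos (show sm ≤ 9 by omega), if_pos (show sm ≤ 11 by omega), List.map_cons]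
      rw [show (List.contains [(1:Int), 3, 5, 7, 8, 9, 11] 1) = true from by decide]
      rw [show (PySem.List.index? [(1:Int), 3, 5, 7, 8, 9, 11] 1).getD 0 = 0 from by decide]
      simp
    · refine Eq.trans ?_ (pvBoth "ZS" [1, 3, 5, 7, 8, 9, 11] sy sm n 1 hd (by norm_num)
        (by simp [show ¬ sm ≤ 1 by omega, show sm ≤ 3 by omega, show sm ≤ 5 by omega, show sm ≤ 7 by omega, show sm ≤ 8 by omega, show sm ≤ 9 by omega, show sm ≤ 11 by omega]))
      simp only [generate_explicit_tickers, choose_start_month, hd]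
      simp only [List.filter_cons, List.filter_nil, decide_eq_true_eq]
      simp only [if_neg (show ¬ sm ≤ 1 by omega), if_pos (show sm ≤ 3 by omega), if_pos (show sm ≤ 5 by omega), if_pos (show sm ≤ 7 by omega), if_pos (show sm ≤ 8 by omega), if_pos (show sm ≤ 9 by omega), if_pos (show sm ≤ 11 by omega), List.map_cons]
      rw [show (List.contains [(1:Int), 3, 5, 7, 8, 9, 11] 3) = true from by decide]
      rw [show (PySem.List.index? [(1:Int), 3, 5, 7, 8, 9, 11] 3).getD 0 = 1 from by decide]
      simp
    · refine Eq.trans ?_ (pvBoth "ZS" [1, 3, 5, 7, 8, 9, 11] sy sm n 2 hd (by norm_num)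
        (by simp [show ¬ sm ≤ 1 by omega, show ¬ sm ≤ 3 by omega, show sm ≤ 5 by omega, show sm ≤ 7 by omega, show sm ≤ 8 by omega, show sm ≤ 9 by omega, show sm ≤ 11 by omega]))
      simp only [generate_explicit_tickers, choose_start_month, hd]
      simp only [List.filter_cons, List.filter_nil, decide_eq_true_eq]
      simp only [if_neg (show ¬ sm ≤ 1 by omega), if_neg (show ¬ sm ≤ 3 by omega), if_pos (show sm ≤ 5 by omega), if_pos (show sm ≤ 7 by omega), if_pos (show sm ≤ 8 by omega), if_pos (show sm ≤ 9 by omega), if_pos (show sm ≤ 11 by omega), List.map_cons]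
      rw [show (List.contains [(1:Int), 3, 5, 7, 8, 9, 11] 5) = true from by decide]
      rw [show (PySem.List.index? [(1:Int), 3, 5, 7, 8, 9, 11] 5).getD 0 = 2 from by decide]
      simp
    · refine Eq.trans ?_ (pvBoth "ZS" [1, 3, 5, 7, 8, 9, 11] sy sm n 3 hd (by norm_num)
        (by simp [show ¬ sm ≤ 1 by omega, show ¬ sm ≤ 3 by omega, show ¬ sm ≤ 5 by omega, show sm ≤ 7 by omega, show sm ≤ 8 by omega, show sm ≤ 9 by omega, show sm ≤ 11 by omega]))
      simp only [generate_explicit_tickers, choose_start_month, hd]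
      simp only [List.filter_cons, List.filter_nil, decide_eq_true_eq]
      simp only [if_neg (show ¬ sm ≤ 1 by omega), if_neg (show ¬ sm ≤ 3 by omega), if_neg (show ¬ sm ≤ 5 by omega), if_pos (show sm ≤ 7 by omega), if_pos (show sm ≤ 8 by omega), if_pos (show sm ≤ 9 by omega), if_pos (show sm ≤ 11 by omega), List.map_cons]
      rw [show (List.contains [(1:Int), 3, 5, 7, 8, 9, 11] 7) = true from by decide]
      rw [show (PySem.List.index? [(1:Int), 3, 5, 7, 8, 9, 11] 7).getD 0 = 3 from by decide]
      simp
    · refine Eq.trans ?_ (pvBoth "ZS" [1, 3, 5, 7, 8, 9, 11] sy sm n 4 hd (by norm_num)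
        (by simp [show ¬ sm ≤ 1 by omega, show ¬ sm ≤ 3 by omega, show ¬ sm ≤ 5 by omega, show ¬ sm ≤ 7 by omega, show sm ≤ 8 by omega, show sm ≤ 9 by omega, show sm ≤ 11 by omega]))
      simp only [generate_explicit_tickers, choose_start_month, hd]
      simp only [List.filter_cons, List.filter_nil, decide_eq_true_eq]
      simp only [if_neg (show ¬ sm ≤ 1 by omega), if_neg (show ¬ sm ≤ 3 by omega), if_neg (show ¬ sm ≤ 5 by omega), if_neg (show ¬ sm ≤ 7 by omega), if_pos (show sm ≤ 8 by omega), if_pos (show sm ≤ 9 by omega), if_pos (show sm ≤ 11 by omega), List.map_cons]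
      rw [show (List.contains [(1:Int), 3, 5, 7, 8, 9, 11] 8) = true from by decide]
      rw [show (PySem.List.index? [(1:Int), 3, 5, 7, 8, 9, 11] 8).getD 0 = 4 from by decide]
      simp
    · refine Eq.trans ?_ (pvBoth "ZS" [1, 3, 5, 7, 8, 9, 11] sy sm n 5 hd (by norm_num)
        (by simp [show ¬ sm ≤ 1 by omega, show ¬ sm ≤ 3 by omega, show ¬ sm ≤ 5 by omega, show ¬ sm ≤ 7 by omega, show ¬ sm ≤ 8 by omega, show sm ≤ 9 by omega, show sm ≤ 11 by omega]))
      simp only [generate_explicit_tickers, choose_start_month, hd]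
      simp only [List.filter_cons, List.filter_nil, decide_eq_true_eq]
      simp only [if_neg (show ¬ sm ≤ 1 by omega), if_neg (show ¬ sm ≤ 3 by omega), if_neg (show ¬ sm ≤ 5 by omega), if_neg (show ¬ sm ≤ 7 by omega), if_neg (show ¬ sm ≤ 8 by omega), if_pos (show sm ≤ 9 by omega), if_pos (show sm ≤ 11 by omega), List.map_cons]
      rw [show (List.contains [(1:Int), 3, 5, 7, 8, 9, 11] 9) = true from by decide]
      rw [show (PySem.List.index? [(1:Int), 3, 5, 7, 8, 9, 11] 9).getD 0 = 5 from by decide]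
      simp
    · refine Eq.trans ?_ (pvBoth "ZS" [1, 3, 5, 7, 8, 9, 11] sy sm n 6 hd (by norm_num)
        (by simp [show ¬ sm ≤ 1 by omega, show ¬ sm ≤ 3 by omega, show ¬ sm ≤ 5 by omega, show ¬ sm ≤ 7 by omega, show ¬ sm ≤ 8 by omega, show ¬ sm ≤ 9 by omega, show sm ≤ 11 by omega]))
      simp only [generate_explicit_tickers, choose_start_month, hd]
      simp only [List.filter_cons, List.filter_nil, decide_eq_true_eq]
      simp only [if_neg (show ¬ sm ≤ 1 by omega), if_neg (show ¬ sm ≤ 3 by omega), if_neg (show ¬ sm ≤ 5 by omega), if_neg (show ¬ sm ≤ 7 by omega), if_neg (show ¬ sm ≤ 8 by omega), if_neg (show ¬ sm ≤ 9 by omega), if_pos (show sm ≤ 11 by omega), List.map_cons]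
      rw [show (List.contains [(1:Int), 3, 5, 7, 8, 9, 11] 11) = true from by decide]
      rw [show (PySem.List.index? [(1:Int), 3, 5, 7, 8, 9, 11] 11).getD 0 = 6 from by decide]
      simp
    · refine Eq.trans ?_ (pvBothWrap "ZS" [1, 3, 5, 7, 8, 9, 11] sy sm n hd (by norm_num)
        (by simp [show ¬ sm ≤ 1 by omega, show ¬ sm ≤ 3 by omega, show ¬ sm ≤ 5 by omega, show ¬ sm ≤ 7 by omega, show ¬ sm ≤ 8 by omega, show ¬ sm ≤ 9 by omega, show ¬ sm ≤ 11 by omega]))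
      simp only [generate_explicit_tickers, choose_start_month, hd]
      simp only [List.filter_cons, List.filter_nil, decide_eq_true_eq]
      simp only [if_neg (show ¬ sm ≤ 1 by omega), if_neg (show ¬ sm ≤ 3 by omega), if_neg (show ¬ sm ≤ 5 by omega), if_neg (show ¬ sm ≤ 7 by omega), if_neg (show ¬ sm ≤ 8 by omega), if_neg (show ¬ sm ≤ 9 by omega), if_neg (show ¬ sm ≤ 11 by omega), List.map_nil]
      rw [show ((PySem.List.pyGet? [(1:Int), 3, 5, 7, 8, 9, 11] 0).getD 0) = 1 from by decide]
      rw [show (List.contains [(1:Int), 3, 5, 7, 8, 9, 11] 1) = true from by decide]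
      rw [show (PySem.List.index? [(1:Int), 3, 5, 7, 8, 9, 11] 1).getD 0 = 0 from by decide]
      simp
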